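-- pv_equiv track=rewrite | github.com/defold/extension-automation-bridge | automation_bridge/automation-bridge-python/automation_bridge/editor.py | _latest_registration_window
-- ===== SOURCE A (Python) =====
-- from typing import Optional, Union
--
-- _AUTOMATION_BRIDGE_ENDPOINT_TEXT = "Automation Bridge endpoint registered"
--
-- def _latest_registration_window(lines: list) -> Optional[list]:
--     endpoint_index: Optional[int] = None
--     previous_endpoint_index: Optional[int] = None
--     for index, line in enumerate(lines):
--         if _AUTOMATION_BRIDGE_ENDPOINT_TEXT in line:
--             previous_endpoint_index = endpoint_index
--             endpoint_index = index
--
--     if endpoint_index is None: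
--         return None
--     start_index = previous_endpoint_index + 1 if previous_endpoint_index is not None else 0
--     return lines[start_index:endpoint_index]
-- ===== SOURCE B (Python) =====
-- _AUTOMATION_BRIDGE_ENDPOINT_TEXT = "Automation Bridge endpoint registered"
--
-- def _latest_registration_window(lines: list):
--     # Scan backwards: the first marker found from the end closes the window;
--     # keep collecting lines until the next marker (or the start) opens it.
--     for j in range(len(lines) - 1, -1, -1):
--         if _AUTOMATION_BRIDGE_ENDPOINT_TEXT in lines[j]:
--             acc = []
--             for i in range(j - 1, -1, -1):
--                 if _AUTOMATION_BRIDGE_ENDPOINT_TEXT in lines[i]: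
--                     break
--                 acc.append(lines[i])
--             return acc[::-1]
--     return None
-- ===== Notes on version B (the rewrite author's own statement) =====
-- stated objective: alternative
-- what changed: Replaces A's forward pass that shuffles two running marker pointers and then slices with a backward scan that exits at the first marker seen from the end and collects the window lines directly (no slicing), stopping early at the previous marker.
import Mathlib
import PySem

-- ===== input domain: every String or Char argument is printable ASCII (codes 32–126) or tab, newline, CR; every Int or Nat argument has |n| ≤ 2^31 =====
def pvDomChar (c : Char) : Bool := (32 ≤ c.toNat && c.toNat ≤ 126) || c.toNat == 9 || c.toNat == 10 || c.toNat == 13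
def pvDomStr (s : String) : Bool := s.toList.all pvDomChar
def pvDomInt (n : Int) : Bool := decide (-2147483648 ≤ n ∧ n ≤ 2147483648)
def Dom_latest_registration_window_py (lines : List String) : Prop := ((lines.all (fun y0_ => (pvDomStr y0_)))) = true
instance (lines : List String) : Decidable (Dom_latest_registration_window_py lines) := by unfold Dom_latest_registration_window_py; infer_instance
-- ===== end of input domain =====

-- B replaces A's forward pass maintaining two running pointers by a backward scan with
-- early exit that collects the window lines directly (objective: alternative traversal).

def pvMarker : String := "Automation Bridge endpoint registered"

-- ===== PORT A =====
-- one forward pass; state = (previous_endpoint_index, endpoint_index)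
def latest_registration_window_py (lines : List String) : Option (List String) :=
  let st := (PySem.List.enumerate lines 0).foldl
    (fun (s : Option Int × Option Int) p =>
      if PySem.Str.isIn pvMarker p.2 then (s.2, some p.1) else s) (none, none)
  match st.2 with
  | none => none
  | some e =>
      let start : Int := match st.1 with | some p => p + 1 | none => 0
      some (PySem.List.slice lines (some start) (some e))

-- ===== PORT B =====
-- inner loop 'for i in range(j-1, -1, -1)': collect lines downward until a marker line;
-- fuel j covers the indices j-1, j-2, …, 0
def pvCollect (lines : List String) : Nat → List String
  | 0 => []
  | i + 1 =>
      if PySem.Str.isIn pvMarker (lines.getD i "") then []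
      else lines.getD i "" :: pvCollect lines i

-- outer loop 'for j in range(len(lines)-1, -1, -1)': first marker from the end returns
def pvScan (lines : List String) : Nat → Option (List String)
  | 0 => none
  | j + 1 =>
      if PySem.Str.isIn pvMarker (lines.getD j "") then some ((pvCollect lines j).reverse)
      else pvScan lines j

def latest_registration_window_py_alt (lines : List String) : Option (List String) :=
  pvScan lines lines.length

-- ===== PRECONDITION & SPEC =====
def Spec_latest_registration_window_py (lines : List String) (out : Option (List String)) : Prop := out = latest_registration_window_py_alt lines
instance (lines : List String) (out : Option (List String)) : Decidable (Spec_latest_registration_window_py lines out) := by unfold Spec_latest_registration_window_py; infer_instance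

-- ===== CLAIM (what is proved, stated in full; the proofs are below) =====
def Claim_equal_latest_registration_window_py : Prop := ∀ (lines : List String), Dom_latest_registration_window_py lines → Spec_latest_registration_window_py lines (latest_registration_window_py lines)

-- ===== LEMMAS AND PROOFS =====

-- proof-only helper: index of the last marker line among the first j lines
def pvLastM (lines : List String) : Nat → Option Nat
  | 0 => none
  | j + 1 =>
      if PySem.Str.isIn pvMarker (lines.getD j "") then some j else pvLastM lines j

theorem pvLastM_lt (lines : List String) (j p : Nat) (h : pvLastM lines j = some p) : p < j := by
  induction j with
  | zero => simp [pvLastM] at h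
  | succ k ih =>
      unfold pvLastM at h
      split at h
      · simp at h; omega
      · exact Nat.lt_succ_of_lt (ih h)

theorem pv_enumerate_append {α : Type} (xs ys : List α) (s : Int) :
    PySem.List.enumerate (xs ++ ys) s
      = PySem.List.enumerate xs s ++ PySem.List.enumerate ys (s + xs.length) := by
  induction xs generalizing s with
  | nil => simp [PySem.List.enumerate_nil]
  | cons x xs ih =>
      simp [PySem.List.enumerate_cons, ih, add_assoc]
      ring_nf

-- A's fold over the first j lines ends at the last two marker indices below j
theorem pv_foldA (lines : List String) (j : Nat) (hj : j ≤ lines.length) :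
    (PySem.List.enumerate (lines.take j) 0).foldl
      (fun (s : Option Int × Option Int) p =>
        if PySem.Str.isIn pvMarker p.2 then (s.2, some p.1) else s) (none, none)
    = ((match pvLastM lines j with
        | none => none
        | some e => (pvLastM lines e).map (fun p => (p : Int))),
       (pvLastM lines j).map (fun e => (e : Int))) := by
  induction j with
  | zero => simp [PySem.List.enumerate_nil, pvLastM]
  | succ k ih =>
      have hk : k < lines.length := by omega
      have htake : lines.take (k + 1) = lines.take k ++ [lines[k]] := by
        rw [List.take_add_one]
        simp [List.getElem?_eq_getElem hk]
      rw [htake, pv_enumerate_append, List.foldl_append, ih (by omega)]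
      have hlen : ((lines.take k).length : Int) = (k : Int) := by
        simp [List.length_take, Nat.min_eq_left (le_of_lt hk)]
      have hgd : lines[k]?.getD "" = lines[k] := by simp [List.getElem?_eq_getElem hk]
      rcases hM : PySem.Chars.isIn pvMarker.toList (lines[k]).toList with _ | _ <;>
        simp [PySem.List.enumerate_cons, PySem.List.enumerate_nil, pvLastM, PySem.Str.isIn,
          hM, hgd, Nat.min_eq_left (le_of_lt hk)]

-- B's outer loop returns the collected window at the last marker index
theorem pv_scan (lines : List String) (j : Nat) :
    pvScan lines j = (pvLastM lines j).map (fun e => (pvCollect lines e).reverse) := by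
  induction j with
  | zero => rfl
  | succ k ih =>
      unfold pvScan pvLastM
      split <;> simp [ih]

-- the collected window below marker index e is the slice from (previous marker)+1 (or 0) to e
theorem pv_collect (lines : List String) (e : Nat) (he : e ≤ lines.length) :
    (pvCollect lines e).reverse
      = (lines.drop (match pvLastM lines e with | some p => p + 1 | none => 0)).take
          (e - (match pvLastM lines e with | some p => p + 1 | none => 0)) := by
  induction e with
  | zero => simp [pvCollect, pvLastM]
  | succ k ih =>
      have hk : k < lines.length := by omega
      unfold pvCollect pvLastM
      rcases hM : PySem.Str.isIn pvMarker (lines.getD k "") with _ | _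
      · -- no marker at k: window extends over line k
        simp only [Bool.false_eq_true, if_false]
        rw [List.reverse_cons, ih (by omega)]
        set sN : Nat := (match pvLastM lines k with | some p => p + 1 | none => 0) with hsN
        have hsk : sN ≤ k := by
          rcases hL : pvLastM lines k with _ | p
          · simp [hsN, hL]
          · have := pvLastM_lt lines k p hL
            simp [hsN, hL]; omega
        have hstep : k + 1 - sN = (k - sN) + 1 := by omega
        rw [hstep, List.take_add_one]
        have hidx : (lines.drop sN)[k - sN]? = some lines[k] := by
          rw [List.getElem?_drop]
          have : sN + (k - sN) = k := by omega
          rw [this, List.getElem?_eq_getElem hk]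
        rw [hidx]
        simp [List.getElem?_eq_getElem hk]
      · -- marker at k closes below: empty window
        simp

theorem latest_registration_window_py_eq (lines : List String) :
    latest_registration_window_py lines = latest_registration_window_py_alt lines := by
  unfold latest_registration_window_py latest_registration_window_py_alt
  have hA := pv_foldA lines lines.length le_rfl
  rw [List.take_length] at hA
  rw [hA, pv_scan]
  rcases hL : pvLastM lines lines.length with _ | e
  · simp
  · have he : e < lines.length := pvLastM_lt lines _ e hL
    have hw := pv_collect lines e (le_of_lt he)
    rcases hP : pvLastM lines e with _ | p
    · -- no previous marker: slice from 0
      rw [hP] at hw; simp at hw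
      simp [hP, hw, PySem.List.slice_to_natCast]
    · -- previous marker at p: slice from p+1
      rw [hP] at hw; simp at hw
      have hc : ((p : Int) + 1) = ((p + 1 : Nat) : Int) := by push_cast; ring
      simp only [hP, Option.map_some, Option.bind_eq_bind, Option.bind_some,
        Option.pure_def]
      rw [hc, PySem.List.slice_natCast, hw]

-- ===== VERDICT (by name: the statement is the Claim_ definition above) =====
theorem latest_registration_window_py_spec : Claim_equal_latest_registration_window_py := by
  intro lines _
  exact latest_registration_window_py_eq lines
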